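-- pv_equiv track=rewrite | github.com/PetarMilojevic13/LeetCode-problems | Find the Closest Palindrome_564.py | formNumber
-- ===== SOURCE A (Python) =====
-- def formNumber(str,length):
--
--     starting_index = len(str)-1
--
--     first=True
--     res = ""
--     while starting_index>=0:
--         num = str[starting_index]
--         if first:
--             first=False
--             if length%2==1:
--                 res+=num
--             else:
--                 res = num + res
--                 res+=num
--         else:
--             res = num + res
--             res += num
--         starting_index-=1
--     return res
-- ===== SOURCE B (Python) =====
-- def formNumber(str, length):
--     if length % 2 == 0:
--         return str + str[::-1]
--     else:
--         return str + str[:-1][::-1]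
-- ===== Notes on version B (the rewrite author's own statement) =====
-- stated objective: simpler
-- what changed: Replaced the character-by-character backward while-loop with two-sided accumulation by a direct slice-based construction: the palindrome is str plus the reverse of str (even length) or of str without its last character (odd length).
import Mathlib
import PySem

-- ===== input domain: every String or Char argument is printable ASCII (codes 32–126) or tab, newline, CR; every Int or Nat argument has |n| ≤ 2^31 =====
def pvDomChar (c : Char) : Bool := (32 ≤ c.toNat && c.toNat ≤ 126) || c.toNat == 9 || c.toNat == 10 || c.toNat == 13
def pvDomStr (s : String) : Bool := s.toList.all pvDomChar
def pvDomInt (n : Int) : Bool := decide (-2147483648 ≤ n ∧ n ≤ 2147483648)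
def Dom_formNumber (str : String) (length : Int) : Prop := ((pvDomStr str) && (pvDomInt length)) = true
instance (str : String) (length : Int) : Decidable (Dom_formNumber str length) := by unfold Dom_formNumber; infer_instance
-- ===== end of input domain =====

-- B replaces A's backward while-loop (prepending and appending each char) by a direct
-- slice-based construction keyed on the parity of `length`; objective: simpler.

-- ===== PORT A =====
-- the while-loop: the Nat counter n stands for starting_index + 1 (n = 0 ⇔ loop exit)
def formNumberLoop (cs : List Char) (length : Int) : Nat → Bool → List Char → List Char
  | 0, _, res => res
  | n + 1, first, res =>
    -- starting_index = n; str[starting_index] is always in range here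
    let num := cs.getD n ' '
    if first then
      if PySem.Int.mod length 2 == 1 then
        formNumberLoop cs length n false (res ++ [num])
      else
        formNumberLoop cs length n false (num :: res ++ [num])
    else
      formNumberLoop cs length n false (num :: res ++ [num])

def formNumber (str : String) (length : Int) : String :=
  String.mk (formNumberLoop str.toList length str.toList.length true [])

-- ===== PORT B =====
def formNumber_alt (str : String) (length : Int) : String :=
  if PySem.Int.mod length 2 == 0 then
    String.mk (str.toList ++ str.toList.reverse)          -- str + str[::-1]
  else
    String.mk (str.toList ++ str.toList.dropLast.reverse) -- str + str[:-1][::-1]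

-- ===== PRECONDITION & SPEC =====
def Spec_formNumber (str : String) (length : Int) (out : String) : Prop := out = formNumber_alt str length
instance (str : String) (length : Int) (out : String) : Decidable (Spec_formNumber str length out) := by unfold Spec_formNumber; infer_instance

-- ===== CLAIM (what is proved, stated in full; the proofs are below) =====
def Claim_equal_formNumber : Prop := ∀ (str : String) (length : Int), Dom_formNumber str length → Spec_formNumber str length (formNumber str length)

-- ===== LEMMAS AND PROOFS =====

-- the not-first phase wraps res with take n and its reverse
theorem formNumberLoop_false (cs : List Char) (length : Int) :
    ∀ (n : Nat), n ≤ cs.length → ∀ (res : List Char),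
      formNumberLoop cs length n false res = cs.take n ++ res ++ (cs.take n).reverse := by
  intro n
  induction n with
  | zero => intro _ res; simp [formNumberLoop]
  | succ m ih =>
    intro h res
    have hm : m < cs.length := by omega
    rw [formNumberLoop]
    simp only [List.getD, Bool.false_eq_true, if_false]
    rw [ih (by omega)]
    have hx : cs.take (m + 1) = cs.take m ++ [cs[m]?.getD ' '] := by
      rw [List.take_succ]
      simp [List.getElem?_eq_getElem hm]
    rw [hx]
    simp

theorem mod_two_cases (length : Int) :
    PySem.Int.mod length 2 = 0 ∨ PySem.Int.mod length 2 = 1 := by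
  have h1 := PySem.Int.mod_nonneg length (b := 2) (by omega)
  have h2 := PySem.Int.mod_lt length (b := 2) (by omega)
  omega

theorem formNumber_eq_alt (str : String) (length : Int) :
    formNumber str length = formNumber_alt str length := by
  unfold formNumber formNumber_alt
  rcases hcs : str.toList with _ | ⟨c, cs⟩
  · rcases mod_two_cases length with h | h <;> simp [formNumberLoop, h]
  · set l := c :: cs with hl
    have hlen : l.length = cs.length + 1 := by simp [hl]
    have htake : l.take cs.length = l.dropLast := by
      rw [List.dropLast_eq_take]; simp [hlen]
    have hget : l[cs.length]?.getD ' ' = l.getLast (by simp [hl]) := by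
      have hc : cs.length < l.length := by omega
      simp [List.getElem?_eq_getElem hc, List.getLast_eq_getElem, hlen]
    have hfull : l.dropLast ++ [l.getLast (by simp [hl])] = l := List.dropLast_concat_getLast (by simp [hl])
    rcases mod_two_cases length with h | h
    · -- even: first step produces num :: [] ++ [num]
      rw [hlen, formNumberLoop]
      simp only [h]
      norm_num
      rw [formNumberLoop_false l length cs.length (by omega), htake, hget]
      congr 1
      calc l.dropLast ++ ([l.getLast (by simp [hl]), l.getLast (by simp [hl])]) ++ l.dropLast.reverse
          = (l.dropLast ++ [l.getLast (by simp [hl])]) ++ ([l.getLast (by simp [hl])] ++ l.dropLast.reverse) := by simp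
        _ = l ++ l.reverse := by
            have hrev : l.reverse = l.getLast (by simp [hl]) :: l.dropLast.reverse := by
              conv_lhs => rw [← hfull]
              simp
            rw [hfull, hrev]
            simp
    · -- odd: first step produces [] ++ [num]
      rw [hlen, formNumberLoop]
      simp only [h]
      norm_num
      rw [formNumberLoop_false l length cs.length (by omega), htake, hget]
      congr 1
      calc l.dropLast ++ [l.getLast (by simp [hl])] ++ l.dropLast.reverse
          = l ++ l.dropLast.reverse := by rw [hfull]

-- ===== VERDICT (by name: the statement is the Claim_ definition above) =====
theorem formNumber_spec : Claim_equal_formNumber := by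
  intro str length _
  exact formNumber_eq_alt str length
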